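-- pv_equiv track=rewrite | github.com/ElvisYong/IS110 | Trial Lab Test 2/your_email_id/q1b.py | find_second_letter
-- ===== SOURCE A (Python) =====
-- def find_second_letter(my_str):
--     # Write your code below
--     count = 0
--     for i in range(len(my_str)):
--         if not my_str[i].isdigit():
--             if count == 1:
--                 return i
--             count += 1
--     return -1
-- ===== SOURCE B (Python) =====
-- def find_second_letter(my_str):
--     def skip_digits(i):
--         # index of the first non-digit character at or after position i (len if none)
--         while i < len(my_str) and my_str[i].isdigit():
--             i += 1
--         return i
--     first = skip_digits(0)
--     second = skip_digits(first + 1)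
--     return second if second < len(my_str) else -1
-- ===== Notes on version B (the rewrite author's own statement) =====
-- stated objective: alternative
-- what changed: Replaces the counter-carrying early-return scan over all characters with the dual formulation: two digit-skipping while loops (skip digits to the first non-digit, then skip digits after it to the second), returning that index if it is in range.
import Mathlib
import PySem

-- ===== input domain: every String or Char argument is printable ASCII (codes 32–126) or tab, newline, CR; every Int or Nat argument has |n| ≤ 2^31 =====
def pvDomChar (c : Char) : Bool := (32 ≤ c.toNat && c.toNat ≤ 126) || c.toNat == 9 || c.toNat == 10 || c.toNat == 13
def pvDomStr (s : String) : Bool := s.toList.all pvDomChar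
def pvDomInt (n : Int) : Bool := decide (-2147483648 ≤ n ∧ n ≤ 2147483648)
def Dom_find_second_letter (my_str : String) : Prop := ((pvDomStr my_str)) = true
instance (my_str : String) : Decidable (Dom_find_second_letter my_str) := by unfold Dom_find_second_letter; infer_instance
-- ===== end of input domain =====

-- B replaces A's counter-carrying early-return scan by two digit-skipping while
-- loops (find the first non-digit, then the first non-digit after it); objective: alternative.


-- ===== PORT A =====
-- loop over the characters with their index i, carrying 'count'; early return when count == 1
def pvA_loop : List Char → Int → Nat → Int
  | [], _, _ => -1
  | c :: cs, i, count =>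
    if ¬ PySem.Chars.isdigit c then
      if count = 1 then i else pvA_loop cs (i + 1) (count + 1)
    else pvA_loop cs (i + 1) count

def find_second_letter (my_str : String) : Int := pvA_loop my_str.toList 0 0

-- ===== PORT B =====
-- the 'while i < len(s) and s[i].isdigit(): i += 1' loop of Source B's skip_digits
def pvSkip (s : List Char) (i : Nat) : Nat :=
  if h : i < s.length then
    if PySem.Chars.isdigit s[i] then pvSkip s (i + 1) else i
  else i
termination_by s.length - i

def find_second_letter_alt (my_str : String) : Int :=
  let cs := my_str.toList
  let first := pvSkip cs 0
  let second := pvSkip cs (first + 1)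
  if second < cs.length then (second : Int) else -1

-- ===== PRECONDITION & SPEC =====
def Spec_find_second_letter (my_str : String) (out : Int) : Prop := out = find_second_letter_alt my_str
instance (my_str : String) (out : Int) : Decidable (Spec_find_second_letter my_str out) := by unfold Spec_find_second_letter; infer_instance

-- ===== CLAIM (what is proved, stated in full; the proofs are below) =====
def Claim_equal_find_second_letter : Prop := ∀ (my_str : String), Dom_find_second_letter my_str → Spec_find_second_letter my_str (find_second_letter my_str)

-- ===== LEMMAS AND PROOFS =====

theorem pvSkip_of_ge (s : List Char) (i : Nat) (h : s.length ≤ i) : pvSkip s i = i := by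
  unfold pvSkip
  simp [Nat.not_lt.mpr h]

-- A's loop with count = 1 finds the first non-digit at or after index i
theorem pvA_loop_one (s : List Char) (i : Nat) :
    pvA_loop (s.drop i) i 1 =
      if pvSkip s i < s.length then ((pvSkip s i : Nat) : Int) else -1 := by
  by_cases h : i < s.length
  · rw [List.drop_eq_getElem_cons h]
    unfold pvSkip
    by_cases hd : PySem.Chars.isdigit s[i]
    · simpa [pvA_loop, hd, h] using pvA_loop_one s (i + 1)
    · simp [pvA_loop, hd, h]
  · rw [List.drop_eq_nil_of_le (Nat.not_lt.mp h)]
    simp [pvA_loop, pvSkip_of_ge s i (Nat.not_lt.mp h), h]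
termination_by s.length - i
decreasing_by omega

-- A's loop with count = 0 skips digits, passes the first non-digit, then behaves as count = 1
theorem pvA_loop_zero (s : List Char) (i : Nat) :
    pvA_loop (s.drop i) i 0 =
      if pvSkip s (pvSkip s i + 1) < s.length then ((pvSkip s (pvSkip s i + 1) : Nat) : Int)
      else -1 := by
  by_cases h : i < s.length
  · rw [List.drop_eq_getElem_cons h]
    by_cases hd : PySem.Chars.isdigit s[i]
    · have hsk : pvSkip s i = pvSkip s (i + 1) := by
        rw [pvSkip]; simp [h, hd]
      simpa [pvA_loop, hd, hsk] using pvA_loop_zero s (i + 1)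
    · have hsk : pvSkip s i = i := by
        rw [pvSkip]; simp [h, hd]
      simpa [pvA_loop, hd, hsk] using pvA_loop_one s (i + 1)
  · have h' := Nat.not_lt.mp h
    rw [List.drop_eq_nil_of_le h']
    have h1 : pvSkip s i = i := pvSkip_of_ge s i h'
    have h2 : pvSkip s (i + 1) = i + 1 := pvSkip_of_ge s (i + 1) (by omega)
    simp [pvA_loop, h1, h2]
    omega
termination_by s.length - i
decreasing_by omega

-- ===== VERDICT (by name: the statement is the Claim_ definition above) =====
theorem find_second_letter_spec : Claim_equal_find_second_letter := by
  intro s _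
  show pvA_loop s.toList 0 0 = find_second_letter_alt s
  have := pvA_loop_zero s.toList 0
  simpa [find_second_letter_alt] using this
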